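-- pv_equiv track=rewrite | github.com/red1239109-cmd/kyzel | src/generate/constrain/__init__.py | code_block_status
-- ===== SOURCE A (Python) =====
-- from typing import List, Optional, Tuple
--
-- CODE_START_LINE = "```python"
--
-- def _split_lines(text: str) -> List[str]:
--     return text.splitlines(keepends=False) if text else []
--
-- def code_block_status(text: str) -> Tuple[bool, bool]:
--     """
--     Markdown-aware code-block detector.
--
--     Returns: (has_content, should_end)
--       - has_content: whether the code block has any non-empty line inside it
--       - should_end: whether a closing fence ``` was detected
--     """
--     if not text:
--         return False, False
--
--     lines_all = _split_lines(text)
--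
--     # Find exact start fence line (tolerant for whitespace).
--     start_idx = None
--     for i, line in enumerate(lines_all):
--         if line.strip() == CODE_START_LINE:
--             start_idx = i
--             break
--     if start_idx is None:
--         return False, False
--
--     lines = lines_all[start_idx + 1 :]
--
--     for i, line in enumerate(lines):
--         # closing fence must be a bare ``` (optionally followed by whitespace)
--         if line.startswith("```") and not line[3:].strip():
--             has_content = any(l.strip() for l in lines[:i])
--             return has_content, True
--
--     has_any_content = any(l.strip() for l in lines)
--     return has_any_content, False
-- ===== SOURCE B (Python) =====
-- CODE_START_LINE = "```python"
--
-- def code_block_status(text):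
--     # One-pass finite state machine over the lines: an inside/outside mode bit,
--     # each line visited exactly once, no index arithmetic, no slicing, no re-scan.
--     inside = False
--     has_content = False
--     for line in text.splitlines():
--         stripped = line.strip()
--         if not inside:
--             if stripped == CODE_START_LINE:
--                 inside = True
--         else:
--             if line.startswith("```") and not line[3:].strip():
--                 return has_content, True
--             has_content = has_content or bool(stripped)
--     return has_content, False
-- ===== Notes on version B (the rewrite author's own statement) =====
-- stated objective: simpler
-- what changed: A locates the start fence by index, slices the tail, scans for the close fence and then re-scans prefix slices with any(); B is a single-pass finite state machine over all lines with an inside/outside mode bit and an accumulated content flag, touching each line exactly once with no indices, slices or secondary scans.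
import Mathlib
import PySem

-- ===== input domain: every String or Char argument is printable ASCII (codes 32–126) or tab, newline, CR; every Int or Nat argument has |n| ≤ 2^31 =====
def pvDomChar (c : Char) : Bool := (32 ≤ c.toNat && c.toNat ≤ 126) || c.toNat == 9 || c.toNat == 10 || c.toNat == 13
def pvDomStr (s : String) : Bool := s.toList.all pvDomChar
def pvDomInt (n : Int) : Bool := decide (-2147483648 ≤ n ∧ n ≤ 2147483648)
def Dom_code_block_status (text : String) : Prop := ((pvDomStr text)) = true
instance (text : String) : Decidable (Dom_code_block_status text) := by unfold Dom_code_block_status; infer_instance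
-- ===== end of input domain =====

-- B replaces A's locate-slice-rescan structure by a single-pass state machine over the lines (objective: simpler).

-- ===== PORT A =====
-- closing fence: line.startswith("```") and not line[3:].strip()
def pvFenceA (l : String) : Bool :=
  PySem.Str.startswith l "```" && (PySem.Str.strip (PySem.Str.slice l (some 3) none) == "")

-- truthiness of l.strip()
def pvContentA (l : String) : Bool := !(PySem.Str.strip l == "")

-- index of first line satisfying p (A's enumerate-with-break loops)
def pvFindIdxA (p : String → Bool) : List String → Option Nat
  | [] => none
  | l :: rest => if p l then some 0 else (pvFindIdxA p rest).map (· + 1)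

def code_block_status (text : String) : Bool × Bool :=
  if text == "" then (false, false)
  else
    let lines_all := PySem.Str.splitlines text
    match pvFindIdxA (fun l => PySem.Str.strip l == "```python") lines_all with
    | none => (false, false)
    | some start_idx =>
      let lines := lines_all.drop (start_idx + 1)
      match pvFindIdxA pvFenceA lines with
      | some i => ((lines.take i).any pvContentA, true)
      | none => (lines.any pvContentA, false)

-- ===== PORT B =====
-- B's single loop, as a recursion over the remaining lines with the two state bits
def pvDfaB (inside has : Bool) : List String → Bool × Bool
  | [] => (has, false)
  | l :: rest =>
    let stripped := PySem.Str.strip l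
    if !inside then
      pvDfaB (stripped == "```python") has rest
    else if PySem.Str.startswith l "```" && (PySem.Str.strip (PySem.Str.slice l (some 3) none) == "") then
      (has, true)
    else
      pvDfaB true (has || !(stripped == "")) rest

def code_block_status_alt (text : String) : Bool × Bool :=
  pvDfaB false false (PySem.Str.splitlines text)

-- ===== PRECONDITION & SPEC =====
def Spec_code_block_status (text : String) (out : Bool × Bool) : Prop := out = code_block_status_alt text
instance (text : String) (out : Bool × Bool) : Decidable (Spec_code_block_status text out) := by unfold Spec_code_block_status; infer_instance

-- ===== CLAIM (what is proved, stated in full; the proofs are below) =====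
def Claim_equal_code_block_status : Prop := ∀ (text : String), Dom_code_block_status text → Spec_code_block_status text (code_block_status text)

-- ===== LEMMAS AND PROOFS =====
lemma pvDfaB_inside (lines : List String) (has : Bool) :
    pvDfaB true has lines =
      match pvFindIdxA pvFenceA lines with
      | some i => (has || (lines.take i).any pvContentA, true)
      | none => (has || lines.any pvContentA, false) := by
  induction lines generalizing has with
  | nil => simp [pvDfaB, pvFindIdxA]
  | cons l rest ih =>
    simp only [pvDfaB, pvFindIdxA, Bool.not_true, Bool.false_eq_true, if_false]
    rw [show (PySem.Str.startswith l "```" &&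
          (PySem.Str.strip (PySem.Str.slice l (some 3) none) == "")) = pvFenceA l from rfl]
    by_cases hf : pvFenceA l = true
    · simp [hf]
    · simp only [hf, Bool.false_eq_true, if_false, ih]
      cases h : pvFindIdxA pvFenceA rest <;>
        simp [pvContentA, Bool.or_assoc]

lemma pvDfaB_outside (lines : List String) :
    pvDfaB false false lines =
      match pvFindIdxA (fun l => PySem.Str.strip l == "```python") lines with
      | none => (false, false)
      | some i => pvDfaB true false (lines.drop (i + 1)) := by
  induction lines with
  | nil => simp [pvDfaB, pvFindIdxA]
  | cons l rest ih =>
    simp only [pvDfaB, pvFindIdxA, Bool.not_false, if_true]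
    by_cases hs : (PySem.Str.strip l == "```python") = true
    · simp [hs]
    · simp only [hs, Bool.false_eq_true, if_false, ih]
      cases h : pvFindIdxA (fun l => PySem.Str.strip l == "```python") rest <;> simp

lemma splitlines_empty : PySem.Str.splitlines "" = [] := by decide

-- ===== VERDICT (by name: the statement is the Claim_ definition above) =====
theorem code_block_status_spec : Claim_equal_code_block_status := by
  intro text _
  unfold Spec_code_block_status code_block_status code_block_status_alt
  by_cases h : text == ""
  · have : text = "" := by simpa using h
    subst this
    simp [splitlines_empty, pvDfaB]
  · simp only [h, Bool.false_eq_true, if_false]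
    rw [pvDfaB_outside]
    cases hs : pvFindIdxA (fun l => PySem.Str.strip l == "```python")
        (PySem.Str.splitlines text) with
    | none => simp
    | some i =>
      simp only
      rw [pvDfaB_inside]
      cases pvFindIdxA pvFenceA ((PySem.Str.splitlines text).drop (i + 1)) <;> simp
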